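-- pv_equiv track=rewrite | github.com/tvoronenko/Python | Udemy_course/Recursion/word_split.py | word_split2
-- ===== SOURCE A (Python) =====
-- def word_split2(phrase,list_of_words, output = None):
--     '''
--     Note: This is a very "python-y" solution.
--     '''
--
--     # Checks to see if any output has been initiated.
--     # If you default output=[], it would be overwritten for every recursion!
--     if output is None:
--         output = []
--
--     # For every word in list
--     for word in list_of_words:
--
--         # If the current phrase begins with the word, we have a split point!
--         if phrase.startswith(word):
--
--             # Add the word to the output
--             output.append(word)
--
--             # Recursively call the split function on the remaining portion of the phrase--- phrase[len(word):]
--             # Remember to pass along the output and list of words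
--             return word_split2(phrase[len(word):],list_of_words,output)
--
--     # Finally return output if no phrase.startswith(word) returns True
--     return output
-- ===== SOURCE B (Python) =====
-- def word_split2(phrase, list_of_words, output=None):
--     # Collect the greedy split into a fresh list with a loop, then extend the
--     # caller's list (preserving its identity) only at the end.
--     words = []
--     while True:
--         word = next((w for w in list_of_words if phrase.startswith(w)), None)
--         if word is None:
--             break
--         words.append(word)
--         phrase = phrase[len(word):]
--     if output is None:
--         return words
--     output.extend(words)
--     return output
-- ===== Notes on version B (the rewrite author's own statement) =====
-- stated objective: alternative
-- what changed: Replaces A's recursion that threads the output accumulator through every call with an iterative while loop that collects the matched words into a fresh list and concatenates it onto the caller's output once at the end.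
import Mathlib
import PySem

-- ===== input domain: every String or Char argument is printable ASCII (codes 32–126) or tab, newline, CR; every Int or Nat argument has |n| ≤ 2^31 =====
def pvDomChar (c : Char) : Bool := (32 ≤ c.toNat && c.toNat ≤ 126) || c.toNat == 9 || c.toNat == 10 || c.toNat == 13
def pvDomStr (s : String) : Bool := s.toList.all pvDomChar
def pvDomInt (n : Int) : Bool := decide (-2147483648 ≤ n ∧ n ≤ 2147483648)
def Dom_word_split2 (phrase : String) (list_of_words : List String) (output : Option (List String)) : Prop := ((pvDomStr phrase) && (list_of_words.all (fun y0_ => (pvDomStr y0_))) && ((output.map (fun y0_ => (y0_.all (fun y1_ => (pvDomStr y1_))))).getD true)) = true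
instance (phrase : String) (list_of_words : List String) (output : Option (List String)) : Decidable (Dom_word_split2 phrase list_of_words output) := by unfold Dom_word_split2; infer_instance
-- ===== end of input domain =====

-- B replaces A's accumulator-threading recursion by a loop that collects the words
-- into a fresh list and appends it to the caller's output once at the end (objective:
-- alternative decomposition). A and B both mutate a passed-in output list in place;
-- the equivalence proved here is about the return value.
-- Both ports use fuel |phrase| + 1: under Pre_ (no empty word) every recursion step
-- consumes at least one character, so the fuel is never exhausted.

-- ===== PORT A =====
-- the 'for word in list_of_words: if phrase.startswith(word): return word' scan of A
def wsAFind (phrase : List Char) : List String → Option String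
  | [] => none
  | w :: ws =>
      if PySem.Chars.startswith phrase w.toList then some w
      else wsAFind phrase ws

-- A's recursion, threading the output accumulator through every call
def wsARec (fuel : Nat) (phrase : List Char) (list_of_words : List String)
    (output : List String) : List String :=
  match fuel with
  | 0 => output
  | f + 1 =>
      match wsAFind phrase list_of_words with
      | some w => wsARec f (phrase.drop w.toList.length) list_of_words (output ++ [w])
      | none => output

def word_split2 (phrase : String) (list_of_words : List String) (output : Option (List String)) : List String :=
  wsARec (phrase.toList.length + 1) phrase.toList list_of_words
    (match output with | none => [] | some o => o)

-- ===== PORT B =====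
-- B's while loop: collect the matched words (next(...) = first match) into a fresh list
def wsBCollect (fuel : Nat) (phrase : List Char) (list_of_words : List String) : List String :=
  match fuel with
  | 0 => []
  | f + 1 =>
      match list_of_words.find? (fun w => PySem.Chars.startswith phrase w.toList) with
      | some w => w :: wsBCollect f (phrase.drop w.toList.length) list_of_words
      | none => []

def word_split2_alt (phrase : String) (list_of_words : List String) (output : Option (List String)) : List String :=
  let words := wsBCollect (phrase.toList.length + 1) phrase.toList list_of_words
  match output with
  | none => words
  | some o => o ++ words

-- ===== PRECONDITION & SPEC =====
-- Pre_ excludes exactly the inputs with '' in list_of_words: there phrase.startswith('')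
-- is always true, so A recurses forever and raises RecursionError (B's loop hangs too).
def Pre_word_split2 (_phrase : String) (list_of_words : List String) (_output : Option (List String)) : Prop :=
  "" ∉ list_of_words

instance (phrase : String) (list_of_words : List String) (output : Option (List String)) : Decidable (Pre_word_split2 phrase list_of_words output) := by unfold Pre_word_split2; infer_instance

def pvWitness_word_split2 : String × List String × Option (List String) :=
  ("themanran", ["the", "ran", "man"], none)

def Spec_word_split2 (phrase : String) (list_of_words : List String) (output : Option (List String)) (out : List String) : Prop := out = word_split2_alt phrase list_of_words output
instance (phrase : String) (list_of_words : List String) (output : Option (List String)) (out : List String) : Decidable (Spec_word_split2 phrase list_of_words output out) := by unfold Spec_word_split2; infer_instance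

-- ===== CLAIM (what is proved, stated in full; the proofs are below) =====
def Claim_equal_word_split2 : Prop := ∀ (phrase : String) (list_of_words : List String) (output : Option (List String)), Dom_word_split2 phrase list_of_words output → Pre_word_split2 phrase list_of_words output → Spec_word_split2 phrase list_of_words output (word_split2 phrase list_of_words output)

-- ===== LEMMAS AND PROOFS =====

-- A's for-loop scan is the first match
theorem wsAFind_eq_find? (phrase : List Char) (L : List String) :
    wsAFind phrase L = L.find? (fun w => PySem.Chars.startswith phrase w.toList) := by
  induction L with
  | nil => rfl
  | cons w ws ih =>
      simp only [wsAFind, List.find?]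
      split_ifs with h <;> simp [h, ih]

-- B's collector distributes over the accumulator
theorem wsARec_eq (fuel : Nat) (L : List String) :
    ∀ (phrase : List Char) (out : List String),
      wsARec fuel phrase L out = out ++ wsBCollect fuel phrase L := by
  induction fuel with
  | zero => intro phrase out; simp [wsARec, wsBCollect]
  | succ f ih =>
      intro phrase out
      simp only [wsARec, wsBCollect, wsAFind_eq_find?]
      cases h : L.find? (fun w => PySem.Chars.startswith phrase w.toList) with
      | none => simp
      | some w => simp [ih]

-- ===== VERDICT (by name: the statement is the Claim_ definition above) =====
theorem word_split2_spec : Claim_equal_word_split2 := by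
  intro phrase L output _ _
  unfold Spec_word_split2 word_split2 word_split2_alt
  cases output <;> simp [wsARec_eq]
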